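-- pv_equiv track=rewrite | github.com/eddy80524/dental-quiz-app | app.py | label_choices
-- ===== SOURCE A (Python) =====
-- def label_choices(choices):
--     labels = []
--     for i in range(len(choices)):
--         label = ""
--         n = i
--         while True:
--             label = chr(65 + n % 26) + label
--             n = n // 26 - 1
--             if n < 0:
--                 break
--         labels.append(label)
--     return [f"{labels[i]}. {c}" for i, c in enumerate(choices)]
-- ===== SOURCE B (Python) =====
-- def label_choices(choices):
--     def col(n):
--         if n < 0:
--             return ""
--         return col(n // 26 - 1) + chr(65 + n % 26)
--     return [f"{col(i)}. {c}" for i, c in enumerate(choices)]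
-- ===== Notes on version B (the rewrite author's own statement) =====
-- stated objective: simpler
-- what changed: Replaced the while-True/break front-prepending accumulator loop and the separate pre-built labels list with a recursive bijective-base-26 helper col(n) used directly in a single comprehension.
import Mathlib
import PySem

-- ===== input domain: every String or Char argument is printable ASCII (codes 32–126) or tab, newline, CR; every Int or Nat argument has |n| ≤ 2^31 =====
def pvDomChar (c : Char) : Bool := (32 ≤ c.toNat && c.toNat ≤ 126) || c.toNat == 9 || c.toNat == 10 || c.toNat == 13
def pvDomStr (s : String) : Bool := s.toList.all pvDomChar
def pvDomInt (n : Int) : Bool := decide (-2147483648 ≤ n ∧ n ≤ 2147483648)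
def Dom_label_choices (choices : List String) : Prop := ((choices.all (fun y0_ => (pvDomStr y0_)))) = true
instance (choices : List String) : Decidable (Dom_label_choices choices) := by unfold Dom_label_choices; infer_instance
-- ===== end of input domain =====

-- B replaces A's while-loop accumulator and pre-built labels list with a recursive
-- bijective-base-26 helper used in a single comprehension (objective: simpler).


-- ===== PORT A =====
-- A's inner `while True` loop: prepend chr(65 + n % 26), step n to n // 26 - 1, stop once n < 0.
-- fuel is only a totality guard: n strictly decreases and stays ≥ 0 until the break, so
-- fuel = n.toNat + 1 is never exhausted (the 0 case is unreachable on the calls made below).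
def pvALoop : Nat → Int → String → String
  | 0, _, label => label
  | fuel + 1, n, label =>
    let label' := String.ofList [Char.ofNat (65 + PySem.Int.mod n 26).toNat] ++ label
    let n' := PySem.Int.floordiv n 26 - 1
    if n' < 0 then label' else pvALoop fuel n' label'

def label_choices (choices : List String) : List String :=
  let labels := (PySem.List.pyRange 0 (choices.length : Int) 1).foldl
    (fun labels i => labels ++ [pvALoop (i.toNat + 1) i ""]) []
  -- labels[i] in the final comprehension: i is always in range, so pyGetD is exact here
  (PySem.List.enumerate choices 0).map
    (fun ic => PySem.List.pyGetD labels ic.1 "" ++ ". " ++ ic.2)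

-- ===== PORT B =====
-- B's recursive helper: col(n) = "" if n < 0 else col(n // 26 - 1) + chr(65 + n % 26);
-- same totality guard: with fuel = n.toNat + 1 the 0 case is unreachable.
def pvCol : Nat → Int → String
  | 0, _ => ""
  | fuel + 1, n =>
    if n < 0 then ""
    else pvCol fuel (PySem.Int.floordiv n 26 - 1) ++ String.ofList [Char.ofNat (65 + PySem.Int.mod n 26).toNat]

def label_choices_alt (choices : List String) : List String :=
  (PySem.List.enumerate choices 0).map (fun ic => pvCol (ic.1.toNat + 1) ic.1 ++ ". " ++ ic.2)

-- ===== PRECONDITION & SPEC =====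
def Spec_label_choices (choices : List String) (out : List String) : Prop := out = label_choices_alt choices
instance (choices : List String) (out : List String) : Decidable (Spec_label_choices choices out) := by unfold Spec_label_choices; infer_instance

-- ===== CLAIM (what is proved, stated in full; the proofs are below) =====
def Claim_equal_label_choices : Prop := ∀ (choices : List String), Dom_label_choices choices → Spec_label_choices choices (label_choices choices)

-- ===== LEMMAS AND PROOFS =====
theorem pvCol_neg (fuel : Nat) (n : Int) (hn : n < 0) : pvCol fuel n = "" := by
  cases fuel with
  | zero => rfl
  | succ f => rw [pvCol, if_pos hn]

-- A's loop equals B's recursion with the tail appended (fuel large enough on both sides).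
theorem pvALoop_eq_col (fuel : Nat) (n : Int) (label : String) (hn : 0 ≤ n) (hf : n < (fuel : Int)) :
    pvALoop fuel n label = pvCol fuel n ++ label := by
  induction fuel generalizing n label with
  | zero => omega
  | succ f ih =>
    rw [pvALoop, pvCol, if_neg (by omega : ¬ n < 0)]
    have h26 : PySem.Int.floordiv n 26 = n / 26 := PySem.Int.floordiv_eq_ediv_of_pos (by norm_num)
    split
    · rename_i h
      rw [pvCol_neg f _ h]
      simp
    · rename_i h
      rw [ih _ _ (by omega) (by rw [h26] at h ⊢; omega)]
      simp [String.append_assoc]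

-- ===== VERDICT (by name: the statement is the Claim_ definition above) =====
theorem label_choices_spec : Claim_equal_label_choices := by
  intro choices _
  unfold Spec_label_choices label_choices label_choices_alt
  rw [PySem.List.foldl_append_singleton_eq_map, List.nil_append]
  refine List.map_congr_left ?_
  intro ic hic
  obtain ⟨k, hk, rfl⟩ := (PySem.List.mem_enumerate_iff _ _ _).1 hic
  simp only [zero_add]
  rw [PySem.List.pyGetD_map_pyRange _ choices.length k _ hk,
      pvALoop_eq_col _ _ _ (by exact_mod_cast Int.natCast_nonneg k) (by simp)]
  simp
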